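-- pv_equiv track=rewrite | github.com/getachew67/Intermediate-Python---Processing-CSVs | hw2_manual.py | highest_stage_per_type
-- ===== SOURCE A (Python) =====
-- def highest_stage_per_type(info):
--     """
--     This takes the parsed data set given by the parse function and sorts out
--     each Pokemon type included in the data and what the highest stage is for
--     that type.  This method returns a dictionary with the type and max stage
--     for each type in the data.
--     """
--     max_stages = {}
--     for i in info:
--         if i['type'] in max_stages:
--             if i['stage'] > max_stages[i['type']]:
--                 max_stages[i['type']] = i['stage']
--         else:
--             max_stages[i['type']] = i['stage']
--     return max_stages
-- ===== SOURCE B (Python) =====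
-- def highest_stage_per_type(info):
--     groups = {}
--     for i in info:
--         groups.setdefault(i['type'], []).append(i['stage'])
--     return {t: max(stages) for t, stages in groups.items()}
-- ===== Notes on version B (the rewrite author's own statement) =====
-- stated objective: alternative
-- what changed: Replaces A's online running-max dict update (compare-and-overwrite per record) with a collect-then-reduce structure: one pass groups all stages per type into lists, then a dict comprehension takes max of each group; key order (first occurrence) and values are identical.
import Mathlib
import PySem

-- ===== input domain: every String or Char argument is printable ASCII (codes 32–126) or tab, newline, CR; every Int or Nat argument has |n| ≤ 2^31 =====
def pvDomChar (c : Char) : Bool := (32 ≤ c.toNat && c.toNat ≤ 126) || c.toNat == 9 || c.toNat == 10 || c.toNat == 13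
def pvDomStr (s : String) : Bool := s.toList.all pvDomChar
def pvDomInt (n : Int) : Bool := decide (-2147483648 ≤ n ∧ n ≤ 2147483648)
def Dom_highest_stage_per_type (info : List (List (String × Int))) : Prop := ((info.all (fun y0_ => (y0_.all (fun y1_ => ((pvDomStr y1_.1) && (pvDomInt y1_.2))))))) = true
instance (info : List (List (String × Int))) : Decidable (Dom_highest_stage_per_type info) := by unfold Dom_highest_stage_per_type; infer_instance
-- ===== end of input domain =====

-- B replaces A's online running-max update with collect-then-reduce (group stages per type, then max each group); same values, same key order.

-- ===== PORT A =====
def highest_stage_per_type (info : List (List (String × Int))) : List (Int × Int) :=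
  (info.foldl
    (fun (max_stages : PySem.Dict Int Int) i =>
      if max_stages.contains ((PySem.Dict.mk i).getD "type" 0) then
        if (PySem.Dict.mk i).getD "stage" 0 > max_stages.getD ((PySem.Dict.mk i).getD "type" 0) 0 then
          max_stages.insert ((PySem.Dict.mk i).getD "type" 0) ((PySem.Dict.mk i).getD "stage" 0)
        else
          max_stages
      else
        max_stages.insert ((PySem.Dict.mk i).getD "type" 0) ((PySem.Dict.mk i).getD "stage" 0))
    PySem.Dict.empty).items

-- ===== PORT B =====
def highest_stage_per_type_alt (info : List (List (String × Int))) : List (Int × Int) :=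
  let groups : PySem.Dict Int (List Int) :=
    info.foldl
      (fun g i =>
        g.modify ((PySem.Dict.mk i).getD "type" 0) []
          (fun stages => stages ++ [(PySem.Dict.mk i).getD "stage" 0]))
      PySem.Dict.empty
  groups.items.map (fun p => (p.1, (PySem.List.max? p.2 (fun x => x)).getD 0))

-- ===== PRECONDITION & SPEC =====
-- Pre_ excludes exactly the records missing a 'type' or 'stage' key, on which the Python A raises KeyError.
def Pre_highest_stage_per_type (info : List (List (String × Int))) : Prop :=
  (info.all (fun i => (PySem.Dict.mk i).contains "type" && (PySem.Dict.mk i).contains "stage")) = true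
instance (info : List (List (String × Int))) : Decidable (Pre_highest_stage_per_type info) := by unfold Pre_highest_stage_per_type; infer_instance
def pvWitness_highest_stage_per_type : (List (List (String × Int))) :=
  [[("type", 5), ("stage", 1)], [("type", 5), ("stage", 3)], [("type", 2), ("stage", 0)]]
def Spec_highest_stage_per_type (info : List (List (String × Int))) (out : List (Int × Int)) : Prop := out = highest_stage_per_type_alt info
instance (info : List (List (String × Int))) (out : List (Int × Int)) : Decidable (Spec_highest_stage_per_type info out) := by unfold Spec_highest_stage_per_type; infer_instance

-- ===== CLAIM (what is proved, stated in full; the proofs are below) =====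
def Claim_equal_highest_stage_per_type : Prop := ∀ (info : List (List (String × Int))), Dom_highest_stage_per_type info → Pre_highest_stage_per_type info → Spec_highest_stage_per_type info (highest_stage_per_type info)

-- ===== LEMMAS AND PROOFS =====

-- abbreviations for the two loop bodies and the reduction, used only by the proofs
def pvMx (ss : List Int) : Int := (PySem.List.max? ss (fun x => x)).getD 0

def pvF : Int × List Int → Int × Int := fun p => (p.1, pvMx p.2)

def pvStepA (ms : PySem.Dict Int Int) (i : List (String × Int)) : PySem.Dict Int Int :=
  if ms.contains ((PySem.Dict.mk i).getD "type" 0) then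
    if (PySem.Dict.mk i).getD "stage" 0 > ms.getD ((PySem.Dict.mk i).getD "type" 0) 0 then
      ms.insert ((PySem.Dict.mk i).getD "type" 0) ((PySem.Dict.mk i).getD "stage" 0)
    else ms
  else ms.insert ((PySem.Dict.mk i).getD "type" 0) ((PySem.Dict.mk i).getD "stage" 0)

def pvStepB (g : PySem.Dict Int (List Int)) (i : List (String × Int)) : PySem.Dict Int (List Int) :=
  g.modify ((PySem.Dict.mk i).getD "type" 0) []
    (fun stages => stages ++ [(PySem.Dict.mk i).getD "stage" 0])

theorem pvFoldl_isSome {α : Type} (f : Option α → α → Option α)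
    (hf : ∀ a x, (f (some a) x).isSome = true) :
    ∀ (l : List α) (a : α), (List.foldl f (some a) l).isSome = true := by
  intro l
  induction l with
  | nil => intro a; rfl
  | cons x xs ih =>
    intro a
    have hf' := hf a x
    simp only [List.foldl_cons]
    cases hfa : f (some a) x with
    | none => rw [hfa] at hf'; simp at hf'
    | some b => exact ih b

theorem pvMax?_isSome (v : List Int) (hv : v ≠ []) :
    ∃ m, PySem.List.max? v (fun x => x) = some m := by
  rw [← Option.isSome_iff_exists]
  cases v with
  | nil => exact absurd rfl hv
  | cons x xs =>
    show (List.foldl _ (some x) xs).isSome = true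
    apply pvFoldl_isSome
    intro a y
    show (if ((fun z : Int => z) a) < ((fun z : Int => z) y) then some y else some a).isSome = true
    split <;> rfl

theorem pvMx_append (v : List Int) (s : Int) (hv : v ≠ []) :
    pvMx (v ++ [s]) = if pvMx v < s then s else pvMx v := by
  obtain ⟨m, hm⟩ := pvMax?_isSome v hv
  simp only [pvMx, PySem.List.max?] at *
  rw [List.foldl_append, hm]
  simp only [List.foldl_cons, List.foldl_nil]
  by_cases h : m < s <;> simp [h]

theorem pvMx_single (s : Int) : pvMx [s] = s := rfl

theorem pvGet?_map_F (l : List (Int × List Int)) (t : Int) :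
    PySem.Dict.get? (PySem.Dict.mk (l.map pvF)) t
      = (PySem.Dict.get? (PySem.Dict.mk l) t).map (fun ss => pvMx ss) := by
  induction l with
  | nil => rfl
  | cons p rest ih =>
    obtain ⟨k, ss⟩ := p
    simp only [List.map_cons, pvF, PySem.Dict.get?_mk_cons]
    by_cases h : (k == t) = true <;> simp [h, ih]

theorem pvGet?_mem (l : List (Int × List Int)) (t : Int) (ss : List Int)
    (h : PySem.Dict.get? (PySem.Dict.mk l) t = some ss) : (t, ss) ∈ l := by
  induction l with
  | nil => simp [PySem.Dict.get?] at h
  | cons p rest ih =>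
    obtain ⟨k, v⟩ := p
    rw [PySem.Dict.get?_mk_cons] at h
    by_cases hk : (k == t) = true
    · rw [if_pos hk] at h
      obtain rfl : v = ss := by simpa using h
      simp [(beq_iff_eq).mp hk]
    · rw [if_neg hk] at h
      exact List.mem_cons_of_mem _ (ih h)

theorem pvContains_map_F (l : List (Int × List Int)) (t : Int) :
    PySem.Dict.contains (PySem.Dict.mk (l.map pvF)) t = PySem.Dict.contains (PySem.Dict.mk l) t := by
  rw [PySem.Dict.contains_eq_isSome_get?, PySem.Dict.contains_eq_isSome_get?, pvGet?_map_F]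
  cases PySem.Dict.get? (PySem.Dict.mk l) t <;> rfl

-- the one-step commuting square: A's update of the running-max dict is B's group update, reduced by pvF
theorem pvStep_rel (g : PySem.Dict Int (List Int)) (i : List (String × Int))
    (h2 : (g.items.map Prod.fst).Nodup) (h3 : ∀ p ∈ g.items, p.2 ≠ []) :
    pvStepA (PySem.Dict.mk (g.items.map pvF)) i = PySem.Dict.mk ((pvStepB g i).items.map pvF) := by
  obtain ⟨l⟩ := g
  set t := (PySem.Dict.mk i).getD "type" 0 with ht
  set s := (PySem.Dict.mk i).getD "stage" 0 with hs
  unfold pvStepA pvStepB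
  simp only [PySem.Dict.modify]
  by_cases hc : PySem.Dict.contains (PySem.Dict.mk l) t = true
  · -- key already present
    obtain ⟨ss, hss⟩ : ∃ ss, PySem.Dict.get? (PySem.Dict.mk l) t = some ss := by
      rw [PySem.Dict.contains_eq_isSome_get?] at hc
      cases h : PySem.Dict.get? (PySem.Dict.mk l) t with
      | none => rw [h] at hc; simp at hc
      | some v => exact ⟨v, rfl⟩
    have hmem : (t, ss) ∈ l := pvGet?_mem l t ss hss
    have hne : ss ≠ [] := h3 (t, ss) hmem
    have hgetA : PySem.Dict.getD (PySem.Dict.mk (l.map pvF)) t 0 = pvMx ss := by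
      rw [PySem.Dict.getD_eq_get?_getD, pvGet?_map_F, hss]; rfl
    have hgetB : PySem.Dict.getD (PySem.Dict.mk l) t [] = ss :=
      PySem.Dict.getD_of_get?_eq_some _ _ hss
    have hcF : PySem.Dict.contains (PySem.Dict.mk (l.map pvF)) t = true := by
      rw [pvContains_map_F]; exact hc
    rw [if_pos hcF, hgetA, hgetB]
    have hitemsB := PySem.Dict.items_insert_of_contains (PySem.Dict.mk l) (ss ++ [s]) hc
    -- every entry of l with key t IS (t, ss), by key-uniqueness
    have huniq : ∀ p ∈ l, p.1 = t → p = (t, ss) := by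
      intro p hp hpt
      exact List.inj_on_of_nodup_map h2 hp hmem hpt
    by_cases hgt : pvMx ss < s
    · rw [if_pos hgt]
      apply PySem.Dict.ext
      rw [PySem.Dict.items_insert_of_contains _ s hcF, hitemsB]
      show (l.map pvF).map _ = (l.map _).map pvF
      rw [List.map_map, List.map_map]
      apply List.map_congr_left
      intro p hp
      by_cases hpt : p.1 = t
      · obtain rfl := huniq p hp hpt
        simp [Function.comp, pvF, pvMx_append ss s hne, hgt]
      · simp [Function.comp, pvF, hpt]
    · rw [if_neg hgt]
      apply PySem.Dict.ext
      rw [hitemsB]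
      show l.map pvF = (l.map _).map pvF
      rw [List.map_map]
      apply List.map_congr_left
      intro p hp
      by_cases hpt : p.1 = t
      · obtain rfl := huniq p hp hpt
        simp [Function.comp, pvF, pvMx_append ss s hne, hgt]
      · simp [Function.comp, pvF, hpt]
  · -- fresh key: both sides append
    have hc' : PySem.Dict.contains (PySem.Dict.mk l) t = false := by
      simp only [Bool.not_eq_true] at hc; exact hc
    have hcF : PySem.Dict.contains (PySem.Dict.mk (l.map pvF)) t = false := by
      rw [pvContains_map_F]; exact hc'
    have hcF' : ¬ (PySem.Dict.contains (PySem.Dict.mk (l.map pvF)) t = true) := by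
      rw [hcF]; exact Bool.false_ne_true
    rw [if_neg hcF', PySem.Dict.getD_of_not_contains _ ([] : List Int) hc']
    apply PySem.Dict.ext
    rw [PySem.Dict.items_insert_of_not_contains _ s hcF,
        PySem.Dict.items_insert_of_not_contains _ ([] ++ [s]) hc']
    simp [pvF, pvMx_single]

theorem pvStepB_nodup (g : PySem.Dict Int (List Int)) (i : List (String × Int))
    (h2 : (g.items.map Prod.fst).Nodup) : ((pvStepB g i).items.map Prod.fst).Nodup := by
  unfold pvStepB
  simp only [PySem.Dict.modify]
  set t := (PySem.Dict.mk i).getD "type" 0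
  by_cases hc : g.contains t = true
  · rw [PySem.Dict.items_insert_of_contains _ _ hc, List.map_map]
    have heq : (Prod.fst ∘ fun p : Int × List Int =>
        if (p.1 == t) = true then (t, g.getD t [] ++ [(PySem.Dict.mk i).getD "stage" 0]) else p)
        = Prod.fst := by
      funext p
      by_cases hpt : (p.1 == t) = true
      · simp [Function.comp, (beq_iff_eq).mp hpt]
      · simp [Function.comp, hpt]
    rw [heq]; exact h2
  · have hc' : g.contains t = false := by simp only [Bool.not_eq_true] at hc; exact hc
    rw [PySem.Dict.items_insert_of_not_contains _ _ hc', List.map_append]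
    have hnot : t ∉ g.items.map Prod.fst := by
      intro hmemk
      obtain ⟨p, hp, hpk⟩ := List.mem_map.mp hmemk
      obtain ⟨l⟩ := g
      rw [PySem.Dict.contains_mk] at hc
      exact hc (List.any_eq_true.mpr ⟨p, hp, by simp [hpk]⟩)
    simp only [List.nodup_append, h2, true_and]
    refine ⟨by simp, ?_⟩
    intro a ha b hb
    simp only [List.map_cons, List.map_nil, List.mem_singleton] at hb
    subst hb
    intro hab
    exact hnot (hab ▸ ha)

theorem pvStepB_ne_nil (g : PySem.Dict Int (List Int)) (i : List (String × Int))
    (h3 : ∀ p ∈ g.items, p.2 ≠ []) : ∀ p ∈ (pvStepB g i).items, p.2 ≠ [] := by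
  unfold pvStepB
  simp only [PySem.Dict.modify]
  set t := (PySem.Dict.mk i).getD "type" 0
  by_cases hc : g.contains t = true
  · rw [PySem.Dict.items_insert_of_contains _ _ hc]
    intro p hp
    obtain ⟨q, hq, hqp⟩ := List.mem_map.mp hp
    by_cases hqt : (q.1 == t) = true
    · rw [if_pos hqt] at hqp; subst hqp; simp
    · rw [if_neg hqt] at hqp; subst hqp; exact h3 q hq
  · have hc' : g.contains t = false := by simp only [Bool.not_eq_true] at hc; exact hc
    rw [PySem.Dict.items_insert_of_not_contains _ _ hc']
    intro p hp
    rcases List.mem_append.mp hp with h | h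
    · exact h3 p h
    · obtain rfl := List.mem_singleton.mp h
      simp

theorem pvFold_rel (l : List (List (String × Int))) (g : PySem.Dict Int (List Int))
    (h2 : (g.items.map Prod.fst).Nodup) (h3 : ∀ p ∈ g.items, p.2 ≠ []) :
    (l.foldl pvStepA (PySem.Dict.mk (g.items.map pvF))).items
      = (l.foldl pvStepB g).items.map pvF := by
  induction l generalizing g with
  | nil => rfl
  | cons i rest ih =>
    simp only [List.foldl_cons]
    rw [pvStep_rel g i h2 h3]
    exact ih (pvStepB g i) (pvStepB_nodup g i h2) (pvStepB_ne_nil g i h3)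

-- ===== VERDICT (by name: the statement is the Claim_ definition above) =====
theorem highest_stage_per_type_spec : Claim_equal_highest_stage_per_type := by
  intro info _hDom _hPre
  unfold Spec_highest_stage_per_type highest_stage_per_type highest_stage_per_type_alt
  have h := pvFold_rel info PySem.Dict.empty (by simp [PySem.Dict.empty]) (by simp [PySem.Dict.empty])
  simp only [PySem.Dict.empty, List.map_nil] at h
  show (info.foldl pvStepA (PySem.Dict.mk [])).items
      = ((info.foldl pvStepB (PySem.Dict.mk [])).items).map (fun p => (p.1, (PySem.List.max? p.2 (fun x => x)).getD 0))
  exact h
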